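-- pv_equiv track=rewrite | github.com/Oyekunle-Mark/sherlock-codes | miminum_unique_array_square.py | getMinimumUniqueSum
-- ===== SOURCE A (Python) =====
-- def getMinimumUniqueSum(arr):
--     # create a set unique_numbers
--     unique_numbers = set()
--     # loop through arr
--     for number in arr:
--         # if number is not in unique_numbers
--         if number not in unique_numbers:
--             # add it
--             unique_numbers.add(number)
--         # otherwise
--         else:
--             # loop while number in unique_numbers
--             while number in unique_numbers:
--                 # increment number
--                 number += 1
--             # add number to unique_numbers
--             unique_numbers.add(number)
--     # return sum of unique_numbers
--     return sum(unique_numbers)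
-- ===== SOURCE B (Python) =====
-- def getMinimumUniqueSum(arr):
--     # Sort, then assign each element the smallest free value >= itself in one
--     # linear pass: cur = max(x, prev + 1); sum the assigned values.
--     s = sorted(arr)
--     if not s:
--         return 0
--     total = s[0]
--     cur = s[0]
--     for x in s[1:]:
--         cur = max(x, cur + 1)
--         total += cur
--     return total
-- ===== Notes on version B (the rewrite author's own statement) =====
-- stated objective: faster
-- what changed: Replaces per-element increment-until-free probing of a growing set by sort + one linear pass assigning cur = max(x, prev+1) and summing; correctness rests on order-independence of the resulting occupied set.
import Mathlib
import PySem

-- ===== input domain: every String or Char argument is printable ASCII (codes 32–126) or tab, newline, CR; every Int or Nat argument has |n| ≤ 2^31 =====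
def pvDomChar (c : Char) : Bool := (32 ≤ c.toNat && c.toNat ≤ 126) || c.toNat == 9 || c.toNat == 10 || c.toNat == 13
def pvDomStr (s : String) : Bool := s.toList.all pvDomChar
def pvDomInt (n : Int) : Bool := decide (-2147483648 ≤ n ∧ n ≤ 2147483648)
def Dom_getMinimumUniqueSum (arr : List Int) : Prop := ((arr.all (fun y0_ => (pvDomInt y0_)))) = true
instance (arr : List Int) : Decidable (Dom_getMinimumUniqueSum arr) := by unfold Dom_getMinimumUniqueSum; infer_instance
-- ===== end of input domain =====

-- B replaces A's per-element increment-until-free probing of a growing set by sort + one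
-- linear pass assigning cur = max(x, prev+1) and summing (objective: faster).


-- ===== PORT A =====
-- termination helper for the 'while number in unique_numbers' loop: the count of set
-- elements ≥ the probe strictly drops at each increment
theorem pvBump_measure (s : List Int) (n : Int) (h : n ∈ s) :
    (s.filter (fun m => decide (n + 1 ≤ m))).length < (s.filter (fun m => decide (n ≤ m))).length := by
  simp only [← List.countP_eq_length_filter]
  have hconv : ∀ (u : List Int),
      u.countP (fun m => decide (n + 1 ≤ m)) = u.countP (fun m => decide (n < m)) :=
    fun u => List.countP_congr (fun x _ => by simp only [decide_eq_true_eq]; omega)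
  simp only [hconv]
  induction s with
  | nil => simp at h
  | cons a t ih =>
    simp only [List.countP_cons]
    rcases List.mem_cons.mp h with rfl | ha
    · have hle : t.countP (fun m => decide (n < m)) ≤ t.countP (fun m => decide (n ≤ m)) :=
        List.countP_mono_left (fun x _ hx => by simp at hx ⊢; omega)
      have h1 : (decide (n < n)) = false := by simp
      have h2 : (decide (n ≤ n)) = true := by simp
      rw [h1, h2]; norm_num; omega
    · have ht := ih ha
      simp only [decide_eq_true_eq]
      split_ifs with hA hB <;> omega

-- 'while number in unique_numbers: number += 1'
def pvBump (s : List Int) (n : Int) : Int :=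
  if h : n ∈ s then pvBump s (n + 1) else n
termination_by (s.filter (fun m => decide (n ≤ m))).length
decreasing_by exact pvBump_measure s n h

-- A: fold over arr keeping the Python set; return sum(unique_numbers)
def getMinimumUniqueSum (arr : List Int) : Int :=
  (arr.foldl
    (fun (uniqueNumbers : PySem.Set Int) number =>
      if number ∉ uniqueNumbers then PySem.Set.add uniqueNumbers number
      else PySem.Set.add uniqueNumbers (pvBump uniqueNumbers number))
    PySem.Set.empty).sum

-- ===== PORT B =====
-- B: sort, then one pass with state (total, cur): cur = max(x, cur+1), total += cur
def getMinimumUniqueSum_alt (arr : List Int) : Int :=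
  match PySem.List.sorted arr (fun x => x) false with
  | [] => 0
  | x :: rest =>
    (rest.foldl (fun (st : Int × Int) y => (st.1 + max y (st.2 + 1), max y (st.2 + 1))) (x, x)).1

-- ===== PRECONDITION & SPEC =====
def Spec_getMinimumUniqueSum (arr : List Int) (out : Int) : Prop := out = getMinimumUniqueSum_alt arr
instance (arr : List Int) (out : Int) : Decidable (Spec_getMinimumUniqueSum arr out) := by unfold Spec_getMinimumUniqueSum; infer_instance

-- ===== CLAIM (what is proved, stated in full; the proofs are below) =====
def Claim_equal_getMinimumUniqueSum : Prop := ∀ (arr : List Int), Dom_getMinimumUniqueSum arr → Spec_getMinimumUniqueSum arr (getMinimumUniqueSum arr)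

-- ===== LEMMAS AND PROOFS =====

-- the assigned values of B's scan, as a list (tail part, after prev value c)
def pvAsg (c : Int) : List Int → List Int
  | [] => []
  | y :: ys => max y (c + 1) :: pvAsg (max y (c + 1)) ys

-- B's occupied list for a sorted input
def pvBAssign : List Int → List Int
  | [] => []
  | x :: xs => x :: pvAsg x xs

-- A's loop step and accumulated set
def pvStep (s : PySem.Set Int) (number : Int) : PySem.Set Int :=
  if number ∉ s then PySem.Set.add s number else PySem.Set.add s (pvBump s number)

theorem pvBump_not_mem (s : List Int) (n : Int) (h : n ∉ s) : pvBump s n = n := by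
  rw [pvBump]; simp [h]

theorem pvBump_mem (s : List Int) (n : Int) (h : n ∈ s) : pvBump s n = pvBump s (n + 1) := by
  rw [pvBump]; simp [h]

theorem pvBump_congr (s t : List Int) (hm : ∀ a, a ∈ s ↔ a ∈ t) (n : Int) :
    pvBump s n = pvBump t n := by
  have key : ∀ f : Nat, ∀ n : Int, (s.filter (fun m => decide (n ≤ m))).length ≤ f →
      pvBump s n = pvBump t n := by
    intro f
    induction f with
    | zero =>
      intro n hf
      have hns : n ∉ s := by
        intro hn
        have : n ∈ s.filter (fun m => decide (n ≤ m)) := List.mem_filter.mpr ⟨hn, by simp⟩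
        have := List.length_pos_of_mem this
        omega
      rw [pvBump_not_mem s n hns, pvBump_not_mem t n (fun ht => hns ((hm n).mpr ht))]
    | succ f ih =>
      intro n hf
      by_cases hn : n ∈ s
      · rw [pvBump_mem s n hn, pvBump_mem t n ((hm n).mp hn)]
        exact ih (n + 1) (by have := pvBump_measure s n hn; omega)
      · rw [pvBump_not_mem s n hn, pvBump_not_mem t n (fun ht => hn ((hm n).mpr ht))]
  exact key _ n le_rfl

theorem pvBump_cons_lt (k : Int) (T : List Int) (n : Int) (h : k < n) :
    pvBump (k :: T) n = pvBump T n := by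
  have key : ∀ f : Nat, ∀ n : Int, k < n →
      (T.filter (fun m => decide (n ≤ m))).length ≤ f → pvBump (k :: T) n = pvBump T n := by
    intro f
    induction f with
    | zero =>
      intro n hk hf
      have hnT : n ∉ T := by
        intro hn
        have : n ∈ T.filter (fun m => decide (n ≤ m)) := List.mem_filter.mpr ⟨hn, by simp⟩
        have := List.length_pos_of_mem this
        omega
      have hnkT : n ∉ k :: T := by
        intro hn
        rcases List.mem_cons.mp hn with rfl | hn
        · omega
        · exact hnT hn
      rw [pvBump_not_mem _ n hnkT, pvBump_not_mem T n hnT]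
    | succ f ih =>
      intro n hk hf
      by_cases hn : n ∈ T
      · have hnk : n ∈ k :: T := List.mem_cons_of_mem _ hn
        rw [pvBump_mem _ n hnk, pvBump_mem T n hn]
        exact ih (n + 1) (by omega) (by have := pvBump_measure T n hn; omega)
      · have hnkT : n ∉ k :: T := by
          intro hcn
          rcases List.mem_cons.mp hcn with rfl | hcn
          · omega
          · exact hn hcn
        rw [pvBump_not_mem _ n hnkT, pvBump_not_mem T n hn]
  exact key _ n h le_rfl

theorem pvAsg_gt (l : List Int) : ∀ c, ∀ a ∈ pvAsg c l, c < a := by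
  induction l with
  | nil => intro c a ha; simp [pvAsg] at ha
  | cons y ys ih =>
    intro c a ha
    rcases List.mem_cons.mp ha with rfl | ha
    · omega
    · have := ih (max y (c + 1)) a ha
      omega

-- inserting at the head of an already-larger sorted tail
theorem pvOInsHead (y : Int) (ys : List Int) (hy : ∀ b ∈ ys, y ≤ b) :
    List.orderedInsert (· ≤ ·) y ys = y :: ys := by
  cases ys with
  | nil => rfl
  | cons z zs => simp [List.orderedInsert, hy z (List.mem_cons_self)]

-- core insertion lemma: inserting v into a sorted tail adds exactly the bumped value
theorem pvAsg_insert (l : List Int) :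
    l.Pairwise (· ≤ ·) → ∀ (v c a : Int),
      (a ∈ pvAsg c (List.orderedInsert (· ≤ ·) v l) ↔
        a ∈ pvAsg c l ∨ a = pvBump (pvAsg c l) (max v (c + 1))) := by
  induction l with
  | nil =>
    intro _ v c a
    rw [show List.orderedInsert (· ≤ ·) v ([] : List Int) = [v] from rfl,
        show pvAsg c [v] = [max v (c + 1)] from rfl,
        show pvAsg c ([] : List Int) = [] from rfl,
        pvBump_not_mem [] _ (by simp)]
    simp
  | cons y ys ih =>
    intro hs v c a
    obtain ⟨hy, hys⟩ := List.pairwise_cons.mp hs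
    by_cases hv : v ≤ y
    · simp only [List.orderedInsert, if_pos hv]
      have hmk : max v (c + 1) ≤ max y (c + 1) := by omega
      rcases lt_or_eq_of_le hmk with hlt | heq
      · -- the new value lands strictly below the old head assignment
        have hky : max y (c + 1) = y := by omega
        have htl : max y (max v (c + 1) + 1) = max y (c + 1) := by omega
        have hnm : max v (c + 1) ∉ max y (c + 1) :: pvAsg (max y (c + 1)) ys := by
          intro hmem
          rcases List.mem_cons.mp hmem with hx | hx
          · omega
          · have := pvAsg_gt ys (max y (c + 1)) _ hx; omega
        rw [show pvAsg c (v :: y :: ys) =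
              max v (c + 1) :: max y (max v (c + 1) + 1) :: pvAsg (max y (max v (c + 1) + 1)) ys from rfl,
            htl, show pvAsg c (y :: ys) = max y (c + 1) :: pvAsg (max y (c + 1)) ys from rfl,
            pvBump_not_mem _ _ hnm]
        simp only [List.mem_cons]
        tauto
      · -- equal head assignments: the inserted element pushes the head up by one
        have hyk : y ≤ max y (c + 1) := by omega
        have hoin : List.orderedInsert (· ≤ ·) y ys = y :: ys := pvOInsHead y ys hy
        have hIH := ih hys y (max y (c + 1)) a
        rw [hoin] at hIH
        have hmax : max y (max y (c + 1) + 1) = max y (c + 1) + 1 := by omega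
        rw [hmax] at hIH
        have hbump : pvBump (max y (c + 1) :: pvAsg (max y (c + 1)) ys) (max v (c + 1))
            = pvBump (pvAsg (max y (c + 1)) ys) (max y (c + 1) + 1) := by
          rw [heq, pvBump_mem _ _ (List.mem_cons_self), pvBump_cons_lt _ _ _ (by omega)]
        rw [show pvAsg c (v :: y :: ys) = max v (c + 1) :: pvAsg (max v (c + 1)) (y :: ys) from rfl,
            show pvAsg c (y :: ys) = max y (c + 1) :: pvAsg (max y (c + 1)) ys from rfl,
            hbump, heq]
        simp only [List.mem_cons]
        constructor
        · rintro (rfl | hx)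
          · tauto
          · rcases (hIH.mp hx) with hx' | hx' <;> tauto
        · rintro ((rfl | hx) | rfl)
          · tauto
          · exact Or.inr (hIH.mpr (Or.inl hx))
          · exact Or.inr (hIH.mpr (Or.inr rfl))
    · simp only [List.orderedInsert, if_neg hv]
      have hkm : max y (c + 1) ≤ max v (c + 1) := by omega
      have hIH := ih hys v (max y (c + 1)) a
      rw [show pvAsg c (y :: List.orderedInsert (· ≤ ·) v ys) =
            max y (c + 1) :: pvAsg (max y (c + 1)) (List.orderedInsert (· ≤ ·) v ys) from rfl,
          show pvAsg c (y :: ys) = max y (c + 1) :: pvAsg (max y (c + 1)) ys from rfl]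
      rcases lt_or_eq_of_le hkm with hlt | heq
      · have hbump : pvBump (max y (c + 1) :: pvAsg (max y (c + 1)) ys) (max v (c + 1))
            = pvBump (pvAsg (max y (c + 1)) ys) (max v (c + 1)) :=
          pvBump_cons_lt _ _ _ hlt
        have hmv : max v (max y (c + 1) + 1) = max v (c + 1) := by omega
        rw [hmv] at hIH
        rw [hbump]
        simp only [List.mem_cons]
        tauto
      · have hbump : pvBump (max y (c + 1) :: pvAsg (max y (c + 1)) ys) (max v (c + 1))
            = pvBump (pvAsg (max y (c + 1)) ys) (max y (c + 1) + 1) := by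
          rw [← heq, pvBump_mem _ _ (List.mem_cons_self), pvBump_cons_lt _ _ _ (by omega)]
        have hmv : max v (max y (c + 1) + 1) = max y (c + 1) + 1 := by omega
        rw [hmv] at hIH
        rw [hbump]
        simp only [List.mem_cons]
        tauto

theorem pvBAssign_insert (l : List Int) (hs : l.Pairwise (· ≤ ·)) (v a : Int) :
    a ∈ pvBAssign (List.orderedInsert (· ≤ ·) v l) ↔
      a ∈ pvBAssign l ∨ a = pvBump (pvBAssign l) v := by
  cases l with
  | nil => simp [List.orderedInsert, pvBAssign, pvAsg, pvBump_not_mem]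
  | cons x xs =>
    have hAsgHead : ∀ (h : Int) (t : List Int), min v x - 1 < h →
        pvAsg (min v x - 1) (h :: t) = pvBAssign (h :: t) := by
      intro h t hh
      rw [show pvAsg (min v x - 1) (h :: t)
            = max h (min v x - 1 + 1) :: pvAsg (max h (min v x - 1 + 1)) t from rfl,
          show max h (min v x - 1 + 1) = h by omega]
      rfl
    have h1 : pvAsg (min v x - 1) (x :: xs) = pvBAssign (x :: xs) := hAsgHead x xs (by omega)
    have h2 : pvAsg (min v x - 1) (List.orderedInsert (· ≤ ·) v (x :: xs))
        = pvBAssign (List.orderedInsert (· ≤ ·) v (x :: xs)) := by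
      by_cases hv : v ≤ x
      · simp only [List.orderedInsert, if_pos hv]; exact hAsgHead v _ (by omega)
      · simp only [List.orderedInsert, if_neg hv]; exact hAsgHead x _ (by omega)
    have h3 := pvAsg_insert (x :: xs) hs v (min v x - 1) a
    rw [h1, h2, show max v (min v x - 1 + 1) = v by omega] at h3
    exact h3

theorem pvStep_mem (s : PySem.Set Int) (v a : Int) :
    a ∈ pvStep s v ↔ a ∈ s ∨ a = pvBump s v := by
  unfold pvStep
  by_cases hv : v ∈ s
  · rw [if_neg (by simpa using hv)]
    exact PySem.Set.mem_add _ _ _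
  · rw [if_pos hv, pvBump_not_mem s v hv]
    exact PySem.Set.mem_add _ _ _

-- main invariant: A's occupied set has the same members as B's assignment of the sorted input
theorem pvMain_mem (arr : List Int) :
    ∀ a, a ∈ arr.foldl pvStep PySem.Set.empty ↔
      a ∈ pvBAssign (PySem.List.sorted arr (fun x => x) false) := by
  induction arr using List.reverseRecOn with
  | nil => intro a; simp [PySem.Set.empty, pvBAssign, PySem.List.sorted]
  | append_singleton arr v ih =>
    intro a
    have hpair : (PySem.List.sorted arr (fun x => x) false).Pairwise (· ≤ ·) :=
      PySem.List.sorted_pairwise arr (fun x => x)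
    have hsort : PySem.List.sorted (arr ++ [v]) (fun x => x) false
        = List.orderedInsert (· ≤ ·) v (PySem.List.sorted arr (fun x => x) false) := by
      apply PySem.List.sorted_id_eq_of_perm_of_pairwise
      · exact ((List.perm_orderedInsert _ v _).trans
          ((PySem.List.sorted_perm arr (fun x => x) false).cons v)).trans
          (List.perm_append_singleton v arr).symm
      · exact List.Pairwise.orderedInsert v _ hpair
    rw [List.foldl_append, hsort]
    simp only [List.foldl_cons, List.foldl_nil]
    rw [pvStep_mem]
    rw [pvBAssign_insert _ hpair v a]
    have hbump := pvBump_congr _ _ ih v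
    rw [hbump]
    constructor
    · rintro (hx | rfl)
      · exact Or.inl ((ih a).mp hx)
      · exact Or.inr rfl
    · rintro (hx | rfl)
      · exact Or.inl ((ih a).mpr hx)
      · exact Or.inr rfl

theorem pvAfold_nodup (arr : List Int) : (arr.foldl pvStep PySem.Set.empty).Nodup := by
  have key : ∀ (l : List Int) (s : PySem.Set Int), s.Nodup → (l.foldl pvStep s).Nodup := by
    intro l
    induction l with
    | nil => intro s hs; exact hs
    | cons x xs ih =>
      intro s hs
      apply ih
      unfold pvStep
      split <;> exact PySem.Set.nodup_add _ _ hs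
  exact key arr _ List.nodup_nil

theorem pvAsg_pairwise (l : List Int) : ∀ c, (pvAsg c l).Pairwise (· < ·) := by
  induction l with
  | nil => intro c; simp [pvAsg]
  | cons y ys ih =>
    intro c
    rw [show pvAsg c (y :: ys) = max y (c + 1) :: pvAsg (max y (c + 1)) ys from rfl]
    exact List.pairwise_cons.mpr ⟨fun a ha => pvAsg_gt ys _ a ha, ih _⟩

theorem pvBAssign_nodup (l : List Int) : (pvBAssign l).Nodup := by
  cases l with
  | nil => exact List.nodup_nil
  | cons x xs =>
    apply List.pairwise_cons.mpr
    refine ⟨fun a ha => ne_of_lt (pvAsg_gt xs x a ha), ?_⟩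
    exact (pvAsg_pairwise xs x).imp (fun h => ne_of_lt h)

theorem pvScan_fst (rest : List Int) : ∀ t c : Int,
    (rest.foldl (fun (st : Int × Int) y => (st.1 + max y (st.2 + 1), max y (st.2 + 1))) (t, c)).1
      = t + (pvAsg c rest).sum := by
  induction rest with
  | nil => intro t c; simp [pvAsg]
  | cons y ys ih =>
    intro t c
    rw [List.foldl_cons, show pvAsg c (y :: ys) = max y (c + 1) :: pvAsg (max y (c + 1)) ys from rfl,
        List.sum_cons]
    rw [ih (t + max y (c + 1)) (max y (c + 1))]
    ring

theorem pvAlt_eq_sum (arr : List Int) :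
    getMinimumUniqueSum_alt arr = (pvBAssign (PySem.List.sorted arr (fun x => x) false)).sum := by
  unfold getMinimumUniqueSum_alt
  cases h : PySem.List.sorted arr (fun x => x) false with
  | nil => simp [pvBAssign]
  | cons x rest =>
    simp only []
    rw [pvScan_fst rest x x, show pvBAssign (x :: rest) = x :: pvAsg x rest from rfl, List.sum_cons]

-- ===== VERDICT (by name: the statement is the Claim_ definition above) =====
theorem getMinimumUniqueSum_spec : Claim_equal_getMinimumUniqueSum := by
  intro arr _
  unfold Spec_getMinimumUniqueSum getMinimumUniqueSum
  rw [pvAlt_eq_sum]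
  show (arr.foldl pvStep PySem.Set.empty).sum = _
  exact List.Perm.sum_eq
    ((List.perm_ext_iff_of_nodup (pvAfold_nodup arr) (pvBAssign_nodup _)).mpr (pvMain_mem arr))
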